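-- pv_equiv track=rewrite | github.com/OGGM/oggm | oggm/utils.py | filter_rgi_name
-- ===== SOURCE A (Python) =====
-- def filter_rgi_name(name):
--     """Remove spurious characters and trailing blanks from RGI glacier name.
--
--     This seems to be unnecessary with RGI V6
--     """
--
--     if name is None or len(name) == 0:
--         return ''
--
--     if name[-1] in ['À', 'È', 'è', '\x9c', '3', 'Ð', '°', '¾',
--                     '\r', '\x93', '¤', '0', '`', '/', 'C', '@',
--                     'Å', '\x06', '\x10', '^', 'å', ';']:
--         return filter_rgi_name(name[:-1])
--
--     return name.strip().title()
-- ===== SOURCE B (Python) =====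
-- _BAD = '\u00c0\u00c8\u00e8\x9c3\u00d0\u00b0\u00be\r\x930`/C@\u00c5\x06\x10^\u00e5;\u00a4'
-- def filter_rgi_name(name):
--     if name is None:
--         return ''
--     return name.rstrip(_BAD).strip().title()
-- ===== Notes on version B (the rewrite author's own statement) =====
-- stated objective: simpler
-- what changed: Replaced A's one-character-at-a-time tail recursion with a single non-recursive str.rstrip(bad_chars).strip().title() pipeline.
import Mathlib
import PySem

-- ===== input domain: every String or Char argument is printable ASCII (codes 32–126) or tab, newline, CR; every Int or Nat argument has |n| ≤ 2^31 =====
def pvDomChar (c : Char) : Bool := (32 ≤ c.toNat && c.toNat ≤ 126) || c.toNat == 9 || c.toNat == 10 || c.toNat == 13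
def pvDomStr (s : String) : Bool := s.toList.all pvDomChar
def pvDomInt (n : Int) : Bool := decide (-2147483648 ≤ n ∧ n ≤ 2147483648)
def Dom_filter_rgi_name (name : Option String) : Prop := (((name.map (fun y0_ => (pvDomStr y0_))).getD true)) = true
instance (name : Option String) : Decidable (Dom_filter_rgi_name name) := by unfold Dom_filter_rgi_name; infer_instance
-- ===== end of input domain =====

-- B replaces A's one-char-at-a-time tail recursion by a single str.rstrip(bad).strip().title() pipeline (simpler decomposition, same values; equivalence proved on the whole domain).


-- ===== PORT A =====
-- the spurious-character list from A (verbatim, same order)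
def pvBadChars : List Char :=
  ['\u00c0', '\u00c8', '\u00e8', '\u009c', '3', '\u00d0', '\u00b0', '\u00be',
   '\r', '\u0093', '\u00a4', '0', '`', '/', 'C', '@',
   '\u00c5', '\u0006', '\u0010', '^', '\u00e5', ';']

-- hand port of str.title() (exact on ASCII: 'cased' = isalpha there): each alpha char is
-- uppercased after a non-alpha (or at the start), lowercased after an alpha; others unchanged.
def pyTitle (cs : List Char) : List Char :=
  (cs.foldl
    (fun (acc : List Char × Bool) c =>
      (acc.1 ++ [if PySem.Chars.isalpha c then
                   (if acc.2 then PySem.Chars.lowerChar c else PySem.Chars.upperChar c)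
                 else c],
       PySem.Chars.isalpha c))
    ([], false)).1

-- A's recursion, on the character list: strip one trailing bad char and recurse
def pvFilterA (cs : List Char) : String :=
  if h : cs = [] then ""
  else if cs.getLast h ∈ pvBadChars then pvFilterA cs.dropLast
  else String.mk (pyTitle (PySem.Chars.strip cs))
termination_by cs.length
decreasing_by
  simpa using Nat.sub_lt (List.length_pos_of_ne_nil h) Nat.one_pos

def filter_rgi_name (name : Option String) : String :=
  match name with
  | none => ""
  | some s => pvFilterA s.toList   -- len(name)==0 is the cs = [] case of the recursion

-- ===== PORT B =====
-- hand port of str.rstrip(chars) (exact): drop trailing chars belonging to the set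
def pyRstripChars (cs : List Char) (chars : List Char) : List Char :=
  (cs.reverse.dropWhile (· ∈ chars)).reverse

def filter_rgi_name_alt (name : Option String) : String :=
  match name with
  | none => ""
  | some s => String.mk (pyTitle (PySem.Chars.strip (pyRstripChars s.toList pvBadChars)))

-- ===== PRECONDITION & SPEC =====
def Spec_filter_rgi_name (name : Option String) (out : String) : Prop := out = filter_rgi_name_alt name
instance (name : Option String) (out : String) : Decidable (Spec_filter_rgi_name name out) := by unfold Spec_filter_rgi_name; infer_instance

-- ===== CLAIM (what is proved, stated in full; the proofs are below) =====
def Claim_equal_filter_rgi_name : Prop := ∀ (name : Option String), Dom_filter_rgi_name name → Spec_filter_rgi_name name (filter_rgi_name name)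

-- ===== LEMMAS AND PROOFS =====

lemma pvFilterA_eq (cs : List Char) :
    pvFilterA cs = String.mk (pyTitle (PySem.Chars.strip (pyRstripChars cs pvBadChars))) := by
  fun_induction pvFilterA cs with
  | case1 =>
      simp [pyRstripChars, pyTitle]
      decide
  | case2 cs h hbad ih =>
      rw [ih]
      have hsplit : cs.reverse = cs.getLast h :: cs.dropLast.reverse := by
        conv_lhs => rw [← List.dropLast_concat_getLast h]
        simp
      simp only [pyRstripChars, hsplit, List.dropWhile_cons]
      simp [hbad]
  | case3 cs h hbad =>
      have hsplit : cs.reverse = cs.getLast h :: cs.dropLast.reverse := by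
        conv_lhs => rw [← List.dropLast_concat_getLast h]
        simp
      simp only [pyRstripChars, hsplit, List.dropWhile_cons]
      simp [hbad, ← hsplit]

-- ===== VERDICT (by name: the statement is the Claim_ definition above) =====
theorem filter_rgi_name_spec : Claim_equal_filter_rgi_name := by
  intro name _
  unfold Spec_filter_rgi_name filter_rgi_name filter_rgi_name_alt
  cases name with
  | none => rfl
  | some s => exact pvFilterA_eq s.toList
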